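-- pv_equiv track=rewrite | github.com/MrBrantCode/unitest_baseline | mut_generate/mist_train_cf/cf_75029/solution.py | sum_squares_cubes_to_n
-- ===== SOURCE A (Python) =====
-- def sum_squares_cubes_to_n(n: int):
--     sum_n = 0
--     sum_square_n = 0
--     sum_cube_n = 0
--     for i in range(1, n+1):
--         sum_n += i
--         sum_square_n += i**2
--         sum_cube_n += i**3
--     return (sum_n, sum_square_n, sum_cube_n)
-- ===== SOURCE B (Python) =====
-- def sum_squares_cubes_to_n(n: int):
--     m = n if n > 0 else 0
--     s = m * (m + 1) // 2
--     return (s, m * (m + 1) * (2 * m + 1) // 6, s * s)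
-- ===== Notes on version B (the rewrite author's own statement) =====
-- stated objective: faster
-- what changed: Replaced the linear accumulation loop by the closed-form polynomial formulas for the sum, the sum of squares and the sum of cubes.
import Mathlib
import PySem

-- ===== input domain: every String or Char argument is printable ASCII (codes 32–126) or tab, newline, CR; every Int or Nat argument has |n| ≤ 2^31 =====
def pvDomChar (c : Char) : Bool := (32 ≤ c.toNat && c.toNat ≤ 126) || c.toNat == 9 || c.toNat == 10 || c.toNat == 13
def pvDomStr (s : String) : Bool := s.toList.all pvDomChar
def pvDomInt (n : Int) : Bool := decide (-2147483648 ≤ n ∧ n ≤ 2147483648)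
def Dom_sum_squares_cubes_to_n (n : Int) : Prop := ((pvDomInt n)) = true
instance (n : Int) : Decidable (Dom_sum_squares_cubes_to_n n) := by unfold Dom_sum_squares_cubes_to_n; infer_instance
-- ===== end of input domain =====

-- B replaces A's O(n) accumulation loop by the closed-form formulas for the three sums (asymptotically faster).

-- ===== PORT A =====
-- A: three running sums over for i in range(1, n+1)
def sum_squares_cubes_to_n (n : Int) : List Int :=
  let st := (PySem.List.pyRange 1 (n + 1) 1).foldl
    (fun (st : Int × Int × Int) i => (st.1 + i, st.2.1 + i ^ 2, st.2.2 + i ^ 3))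
    (0, 0, 0)
  [st.1, st.2.1, st.2.2]

-- ===== PORT B =====
def sum_squares_cubes_to_n_alt (n : Int) : List Int :=
  let m := if n > 0 then n else 0
  let s := PySem.Int.floordiv (m * (m + 1)) 2
  [s, PySem.Int.floordiv (m * (m + 1) * (2 * m + 1)) 6, s * s]

-- ===== PRECONDITION & SPEC =====
def Spec_sum_squares_cubes_to_n (n : Int) (out : List Int) : Prop := out = sum_squares_cubes_to_n_alt n
instance (n : Int) (out : List Int) : Decidable (Spec_sum_squares_cubes_to_n n out) := by unfold Spec_sum_squares_cubes_to_n; infer_instance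

-- ===== CLAIM (what is proved, stated in full; the proofs are below) =====
def Claim_equal_sum_squares_cubes_to_n : Prop := ∀ (n : Int), Dom_sum_squares_cubes_to_n n → Spec_sum_squares_cubes_to_n n (sum_squares_cubes_to_n n)

-- ===== LEMMAS AND PROOFS =====

-- A's loop state after iterating over range(1, k+1), characterised by the three closed forms
lemma loopA_closed (k : Nat) :
    2 * ((PySem.List.pyRange 1 ((k : Int) + 1) 1).foldl
      (fun (st : Int × Int × Int) i => (st.1 + i, st.2.1 + i ^ 2, st.2.2 + i ^ 3)) (0, 0, 0)).1
        = k * (k + 1) ∧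
    6 * ((PySem.List.pyRange 1 ((k : Int) + 1) 1).foldl
      (fun (st : Int × Int × Int) i => (st.1 + i, st.2.1 + i ^ 2, st.2.2 + i ^ 3)) (0, 0, 0)).2.1
        = k * (k + 1) * (2 * k + 1) ∧
    ((PySem.List.pyRange 1 ((k : Int) + 1) 1).foldl
      (fun (st : Int × Int × Int) i => (st.1 + i, st.2.1 + i ^ 2, st.2.2 + i ^ 3)) (0, 0, 0)).2.2
        = (((PySem.List.pyRange 1 ((k : Int) + 1) 1).foldl
      (fun (st : Int × Int × Int) i => (st.1 + i, st.2.1 + i ^ 2, st.2.2 + i ^ 3)) (0, 0, 0)).1) ^ 2 := by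
  induction k with
  | zero => decide
  | succ k ih =>
    have h : PySem.List.pyRange 1 ((↑(k + 1) : Int) + 1) 1
        = PySem.List.pyRange 1 ((k : Int) + 1) 1 ++ [((k : Int) + 1)] := by
      have := PySem.List.pyRange_one_succ_right (a := 1) (b := (k : Int) + 1) (by omega)
      simpa [show ((↑(k + 1) : Int) + 1) = (k : Int) + 1 + 1 by push_cast; ring] using this
    obtain ⟨h1, h2, h3⟩ := ih
    rw [h, List.foldl_append]
    simp only [List.foldl_cons, List.foldl_nil]
    generalize hp : (PySem.List.pyRange 1 ((k : Int) + 1) 1).foldl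
      (fun (st : Int × Int × Int) i => (st.1 + i, st.2.1 + i ^ 2, st.2.2 + i ^ 3)) (0, 0, 0) = p at h1 h2 h3
    obtain ⟨a, b, c⟩ := p
    simp only at h1 h2 h3 ⊢
    push_cast
    refine ⟨by ring_nf; ring_nf at h1; omega, by nlinarith, by nlinarith⟩

lemma floordiv_of_double (x a : Int) (h : 2 * x = a) : PySem.Int.floordiv a 2 = x := by
  rw [PySem.Int.floordiv_eq_iff_of_pos (by omega)]; omega

lemma floordiv_of_six (x a : Int) (h : 6 * x = a) : PySem.Int.floordiv a 6 = x := by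
  rw [PySem.Int.floordiv_eq_iff_of_pos (by omega)]; omega

-- ===== VERDICT (by name: the statement is the Claim_ definition above) =====
theorem sum_squares_cubes_to_n_spec : Claim_equal_sum_squares_cubes_to_n := by
  intro n _
  unfold Spec_sum_squares_cubes_to_n sum_squares_cubes_to_n sum_squares_cubes_to_n_alt
  by_cases hn : n > 0
  · simp only [hn, if_pos]
    obtain ⟨k, hk⟩ : ∃ k : Nat, n = (k : Int) := ⟨n.toNat, by omega⟩
    subst hk
    obtain ⟨h1, h2, h3⟩ := loopA_closed k
    rw [floordiv_of_double _ _ h1, floordiv_of_six _ _ h2, h3, pow_two]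
  · have h0 : PySem.List.pyRange 1 (n + 1) 1 = [] := by
      rw [PySem.List.pyRange_of_pos 1 (n + 1) (by omega : (0:Int) < 1)]
      simp [show ¬((1:Int) < n + 1) from by omega]
    simp only [if_neg hn, h0]
    decide
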